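-- pv_equiv track=rewrite | github.com/q5438722/intent_formalization | scripts/_archive/run_full_pipeline.py | strip_spec
-- ===== SOURCE A (Python) =====
-- def strip_spec(source_text: str) -> str:
--     """Strip requires/ensures clauses from exec functions to test if φ is a tautology.
--
--     Replaces requires/ensures blocks on exec functions with 'requires true, ensures true,'.
--     This is conservative: if φ still verifies without the spec, it's spec-independent.
--     """
--     import re as _re
--     lines = source_text.split('\n')
--     result = []
--     i = 0
--     in_spec_block = False
--     brace_depth = 0
--
--     while i < len(lines):
--         line = lines[i]
--         stripped = line.strip()
--
--         # Detect start of requires/ensures on exec functions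
--         # We replace any requires/ensures clause content with 'true'
--         if not in_spec_block and stripped in ('requires', 'ensures'):
--             # Check if next non-empty lines are spec clauses (indented conditions)
--             # Replace the clause block with 'true,'
--             result.append(line)  # keep the keyword
--             i += 1
--             # Skip all indented condition lines until we hit another keyword or fn body
--             added_true = False
--             while i < len(lines):
--                 next_stripped = lines[i].strip()
--                 # Stop at: next keyword, opening brace, empty line followed by non-spec
--                 if next_stripped in ('requires', 'ensures', 'recommends', 'decreases', '{', '}', ''):
--                     break
--                 if next_stripped.startswith('//'):
--                     result.append(lines[i])  # keep comments
--                     i += 1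
--                     continue
--                 if not added_true:
--                     # Replace first condition line with 'true,'
--                     indent = len(lines[i]) - len(lines[i].lstrip())
--                     result.append(' ' * indent + 'true,')
--                     added_true = True
--                 # Skip remaining condition lines
--                 i += 1
--             continue
--
--         result.append(line)
--         i += 1
--
--     return '\n'.join(result)
-- ===== SOURCE B (Python) =====
-- def strip_spec(source_text: str) -> str:
--     """Strip requires/ensures clauses, replacing each block's conditions with 'true,'."""
--     TERMINATORS = ('requires', 'ensures', 'recommends', 'decreases', '{', '}', '')
--     result = []
--     skipping = False
--     added_true = False
--     for line in source_text.split('\n'):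
--         stripped = line.strip()
--         if skipping:
--             if stripped in TERMINATORS:
--                 skipping = False  # fall through: re-dispatch this line below
--             elif stripped.startswith('//'):
--                 result.append(line)  # keep comments
--                 continue
--             elif not added_true:
--                 indent = len(line) - len(line.lstrip())
--                 result.append(' ' * indent + 'true,')
--                 added_true = True
--                 continue
--             else:
--                 continue
--         result.append(line)
--         if stripped in ('requires', 'ensures'):
--             skipping = True
--             added_true = False
--     return '\n'.join(result)
-- ===== Notes on version B (the rewrite author's own statement) =====
-- stated objective: simpler
-- what changed: A's nested while-loops with a manual line index (inner loop consuming a spec block, then re-entering the outer loop at the break line) are replaced by a single flat for-pass over the lines driven by an explicit skipping/added_true state that re-dispatches terminator lines in the same step.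
import Mathlib
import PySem

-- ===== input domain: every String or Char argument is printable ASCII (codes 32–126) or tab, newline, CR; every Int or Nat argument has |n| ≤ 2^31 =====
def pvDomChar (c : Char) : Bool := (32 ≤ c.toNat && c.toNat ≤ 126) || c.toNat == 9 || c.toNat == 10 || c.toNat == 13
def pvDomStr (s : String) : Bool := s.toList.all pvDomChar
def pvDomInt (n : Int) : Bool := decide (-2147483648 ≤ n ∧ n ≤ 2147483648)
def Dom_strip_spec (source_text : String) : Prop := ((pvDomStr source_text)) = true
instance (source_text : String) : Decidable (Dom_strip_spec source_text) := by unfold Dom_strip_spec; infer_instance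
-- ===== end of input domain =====

-- B replaces A's nested while-loops with index i by a single flat pass driven by an
-- explicit skipping/added_true state (objective: simpler decomposition, same cost).


-- ===== PORT A =====
-- shared string helpers: the literal tuples tested in both Pythons, and the 'true,' line
def pvIsTerm (s : String) : Bool :=
  s = "requires" || s = "ensures" || s = "recommends" || s = "decreases" || s = "{" || s = "}" || s = ""

def pvIsKw (s : String) : Bool := s = "requires" || s = "ensures"

def pvTrueLine (l : String) : String :=
  String.ofList (List.replicate (PySem.Str.len l - PySem.Str.len (PySem.Str.lstrip l)).toNat ' ') ++ "true,"

-- A's inner while-loop: returns (lines appended, lines remaining at the break)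
def stripA_inner : List String → Bool → List String × List String
  | [], _ => ([], [])
  | l :: rest, added =>
    let ns := PySem.Str.strip l
    if pvIsTerm ns then ([], l :: rest)
    else if PySem.Str.startswith ns "//" then
      let p := stripA_inner rest added
      (l :: p.1, p.2)
    else if !added then
      let p := stripA_inner rest true
      (pvTrueLine l :: p.1, p.2)
    else stripA_inner rest added

-- termination fact the outer loop's recursion needs
theorem stripA_inner_len (ls : List String) (added : Bool) :
    (stripA_inner ls added).2.length ≤ ls.length := by
  induction ls generalizing added with
  | nil => simp [stripA_inner]
  | cons l rest ih =>
    simp only [stripA_inner]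
    split_ifs <;> simp <;> exact le_trans (ih _) (Nat.le_succ _)

-- A's outer while-loop over the line index
def stripA_loop : List String → List String
  | [] => []
  | l :: rest =>
    if pvIsKw (PySem.Str.strip l) then
      let p := stripA_inner rest false
      l :: (p.1 ++ stripA_loop p.2)
    else l :: stripA_loop rest
termination_by ls => ls.length
decreasing_by
  · have := stripA_inner_len rest false; simp; omega
  · simp

def strip_spec (source_text : String) : String :=
  PySem.Str.join "\n" (stripA_loop ((PySem.Str.split? source_text "\n").getD []))

-- ===== PORT B =====
-- B's single pass: state none = normal, some added = inside a spec block ('added_true' = added)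
def stripB_go : List String → Option Bool → List String
  | [], _ => []
  | l :: rest, st =>
    let ns := PySem.Str.strip l
    match st with
    | some added =>
      if pvIsTerm ns then
        -- leave skipping and re-dispatch this line in the same step
        l :: stripB_go rest (if pvIsKw ns then some false else none)
      else if PySem.Str.startswith ns "//" then l :: stripB_go rest (some added)
      else if !added then pvTrueLine l :: stripB_go rest (some true)
      else stripB_go rest (some added)
    | none =>
      l :: stripB_go rest (if pvIsKw ns then some false else none)

def strip_spec_alt (source_text : String) : String :=
  PySem.Str.join "\n" (stripB_go ((PySem.Str.split? source_text "\n").getD []) none)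

-- ===== PRECONDITION & SPEC =====
def Spec_strip_spec (source_text : String) (out : String) : Prop := out = strip_spec_alt source_text
instance (source_text : String) (out : String) : Decidable (Spec_strip_spec source_text out) := by unfold Spec_strip_spec; infer_instance

-- ===== CLAIM (what is proved, stated in full; the proofs are below) =====
def Claim_equal_strip_spec : Prop := ∀ (source_text : String), Dom_strip_spec source_text → Spec_strip_spec source_text (strip_spec source_text)

-- ===== LEMMAS AND PROOFS =====

-- the state machine agrees with A's pair of nested loops, in both states
theorem stripB_go_eq (n : Nat) : ∀ ls : List String, ls.length ≤ n →
    (stripB_go ls none = stripA_loop ls) ∧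
    ∀ added, stripB_go ls (some added) =
      (stripA_inner ls added).1 ++ stripA_loop (stripA_inner ls added).2 := by
  induction n with
  | zero =>
    intro ls h
    have hls : ls = [] := List.length_eq_zero_iff.mp (Nat.le_zero.mp h)
    subst hls
    exact ⟨by simp [stripB_go, stripA_loop],
           fun a => by simp [stripB_go, stripA_inner, stripA_loop]⟩
  | succ n ih =>
    intro ls h
    match ls with
    | [] =>
      exact ⟨by simp [stripB_go, stripA_loop],
             fun a => by simp [stripB_go, stripA_inner, stripA_loop]⟩
    | l :: rest =>
      have hr : rest.length ≤ n := by simpa using h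
      have ihn := (ih rest hr).1
      have ihs := (ih rest hr).2
      have hdisp : stripB_go (l :: rest) none = stripA_loop (l :: rest) := by
        simp only [stripB_go, stripA_loop]
        by_cases hk : pvIsKw (PySem.Str.strip l)
        · simp only [hk, if_pos]
          rw [ihs false]
        · simp only [hk, ite_false, Bool.false_eq_true]
          rw [ihn]
      refine ⟨hdisp, fun added => ?_⟩
      simp only [stripB_go, stripA_inner]
      split_ifs with ht hk hc ha
      · -- terminator that is itself 'requires'/'ensures': a new block opens at once
        rw [List.nil_append, stripA_loop, if_pos hk, ihs false]
      · -- other terminator: back to normal copying from this very line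
        rw [List.nil_append, stripA_loop, if_neg hk, ihn]
      · -- comment line is kept in both
        rw [List.cons_append, ihs added]
      · -- first condition line becomes '<indent>true,'
        rw [List.cons_append, ihs true]
      · -- further condition lines are dropped
        exact ihs added

-- ===== VERDICT (by name: the statement is the Claim_ definition above) =====
theorem strip_spec_spec : Claim_equal_strip_spec := by
  intro s _
  unfold Spec_strip_spec strip_spec strip_spec_alt
  rw [(stripB_go_eq _ _ (le_refl _)).1]
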